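-- pv_equiv track=rewrite | github.com/jpribeir/AdventCalender2020 | code/day12.py | rotate_direction
-- ===== SOURCE A (Python) =====
-- def rotate_direction(side,value,ns_offset,ew_offset):
--     cycle = int(value/90)
--     if side == "R":
--         for i in range(cycle):
--             offset_buf = ew_offset
--             ew_offset = ns_offset
--             ns_offset = -offset_buf
--     else:
--         for i in range(cycle):
--             offset_buf = ns_offset
--             ns_offset = ew_offset
--             ew_offset = -offset_buf
--     return ns_offset,ew_offset
-- ===== SOURCE B (Python) =====
-- def rotate_direction(side, value, ns_offset, ew_offset):
--     cycle = int(value / 90)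
--     k = cycle % 4 if cycle > 0 else 0
--     if side == "R":
--         if k == 1:
--             return -ew_offset, ns_offset
--         if k == 2:
--             return -ns_offset, -ew_offset
--         if k == 3:
--             return ew_offset, -ns_offset
--         return ns_offset, ew_offset
--     else:
--         if k == 1:
--             return ew_offset, -ns_offset
--         if k == 2:
--             return -ns_offset, -ew_offset
--         if k == 3:
--             return -ew_offset, ns_offset
--         return ns_offset, ew_offset
-- ===== Notes on version B (the rewrite author's own statement) =====
-- stated objective: faster
-- what changed: Replaces the loop that applies a 90-degree swap cycle = int(value/90) times with a single modular reduction k = cycle % 4 (0 when cycle <= 0, matching the empty loop) and a closed-form offset mapping for each k.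
import Mathlib
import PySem

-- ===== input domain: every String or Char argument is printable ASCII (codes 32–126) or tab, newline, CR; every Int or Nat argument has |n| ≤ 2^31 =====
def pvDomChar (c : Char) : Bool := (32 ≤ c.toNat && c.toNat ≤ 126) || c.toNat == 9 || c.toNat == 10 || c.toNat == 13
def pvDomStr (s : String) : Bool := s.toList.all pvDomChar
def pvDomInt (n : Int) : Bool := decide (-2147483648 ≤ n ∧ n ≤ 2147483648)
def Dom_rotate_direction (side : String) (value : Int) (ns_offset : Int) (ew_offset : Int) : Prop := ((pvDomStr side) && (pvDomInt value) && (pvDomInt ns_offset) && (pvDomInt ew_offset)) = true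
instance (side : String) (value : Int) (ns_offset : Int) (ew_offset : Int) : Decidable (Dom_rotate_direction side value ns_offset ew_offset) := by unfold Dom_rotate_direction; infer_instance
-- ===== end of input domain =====

-- B replaces A's cycle-times rotation loop with cycle % 4 plus a closed-form offset mapping (O(1) instead of O(|value|)).

-- ===== PORT A =====
-- int(value/90): Python float division then int() truncation; for |value| ≤ 2^31 this
-- equals truncating integer division (the float error is far below 1/90), i.e. Int.tdiv.
def rotate_direction (side : String) (value : Int) (ns_offset : Int) (ew_offset : Int) : Int × Int :=
  let cycle := Int.tdiv value 90
  if side == "R" then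
    (PySem.List.pyRange 0 cycle 1).foldl
      (fun (s : Int × Int) _ => (-s.2, s.1)) (ns_offset, ew_offset)
  else
    (PySem.List.pyRange 0 cycle 1).foldl
      (fun (s : Int × Int) _ => (s.2, -s.1)) (ns_offset, ew_offset)

-- ===== PORT B =====
def rotate_direction_alt (side : String) (value : Int) (ns_offset : Int) (ew_offset : Int) : Int × Int :=
  let cycle := Int.tdiv value 90
  let k : Int := if cycle > 0 then cycle % 4 else 0
  if side == "R" then
    if k = 1 then (-ew_offset, ns_offset)
    else if k = 2 then (-ns_offset, -ew_offset)
    else if k = 3 then (ew_offset, -ns_offset)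
    else (ns_offset, ew_offset)
  else
    if k = 1 then (ew_offset, -ns_offset)
    else if k = 2 then (-ns_offset, -ew_offset)
    else if k = 3 then (-ew_offset, ns_offset)
    else (ns_offset, ew_offset)

-- ===== PRECONDITION & SPEC =====
def Spec_rotate_direction (side : String) (value : Int) (ns_offset : Int) (ew_offset : Int) (out : Int × Int) : Prop := out = rotate_direction_alt side value ns_offset ew_offset
instance (side : String) (value : Int) (ns_offset : Int) (ew_offset : Int) (out : Int × Int) : Decidable (Spec_rotate_direction side value ns_offset ew_offset out) := by unfold Spec_rotate_direction; infer_instance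

-- ===== CLAIM (what is proved, stated in full; the proofs are below) =====
def Claim_equal_rotate_direction : Prop := ∀ (side : String) (value : Int) (ns_offset : Int) (ew_offset : Int), Dom_rotate_direction side value ns_offset ew_offset → Spec_rotate_direction side value ns_offset ew_offset (rotate_direction side value ns_offset ew_offset)

-- ===== LEMMAS AND PROOFS =====

-- A fold that ignores the list elements is an iterate of the step function.
theorem pv_foldl_const_iterate (g : Int × Int → Int × Int) :
    ∀ (xs : List Int) (init : Int × Int),
      xs.foldl (fun s _ => g s) init = g^[xs.length] init := by
  intro xs
  induction xs with
  | nil => intro init; simp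
  | cons x xs ih =>
      intro init
      simp [List.foldl, ih, Function.iterate_succ_apply]

-- Iterating a period-4 step function only depends on the count mod 4.
theorem pv_iterate_mod4 (g : Int × Int → Int × Int)
    (h : ∀ p, g (g (g (g p))) = p) :
    ∀ (n : Nat) (p : Int × Int), g^[n] p = g^[n % 4] p := by
  intro n
  induction n using Nat.strong_induction_on with
  | _ n ih =>
      intro p
      by_cases h4 : n < 4
      · interval_cases n <;> simp
      · have hn : n - 4 + 4 = n := by omega
        have h4p : g^[4] p = p := by
          have : g^[4] p = g (g (g (g p))) := by
            simp [Function.iterate_succ_apply]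
          rw [this, h]
        calc g^[n] p = g^[(n - 4) + 4] p := by rw [hn]
          _ = g^[n - 4] (g^[4] p) := by rw [Function.iterate_add_apply]
          _ = g^[n - 4] p := by rw [h4p]
          _ = g^[(n - 4) % 4] p := ih (n - 4) (by omega) p
          _ = g^[n % 4] p := by congr 1; omega

theorem pv_rotate_branch (g : Int × Int → Int × Int)
    (h : ∀ p, g (g (g (g p))) = p) (cycle : Int) (p : Int × Int) :
    (PySem.List.pyRange 0 cycle 1).foldl (fun s _ => g s) p =
      g^[(if cycle > 0 then cycle % 4 else 0).toNat] p := by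
  rw [pv_foldl_const_iterate, PySem.List.length_pyRange_one,
      pv_iterate_mod4 g h]
  congr 1
  omega

theorem rotate_direction_eq_alt (side : String) (value : Int)
    (ns_offset : Int) (ew_offset : Int) :
    rotate_direction side value ns_offset ew_offset =
      rotate_direction_alt side value ns_offset ew_offset := by
  unfold rotate_direction rotate_direction_alt
  set cycle := Int.tdiv value 90 with hc
  have hk : (if cycle > 0 then cycle % 4 else 0) = 0 ∨
            (if cycle > 0 then cycle % 4 else 0) = 1 ∨
            (if cycle > 0 then cycle % 4 else 0) = 2 ∨
            (if cycle > 0 then cycle % 4 else 0) = 3 := by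
    by_cases h : cycle > 0 <;> simp [h] <;> omega
  by_cases hs : side == "R" <;> simp only [hs, if_true, if_false, Bool.false_eq_true] <;>
    [ rw [pv_rotate_branch (fun s => (-s.2, s.1)) (by intro p; simp) cycle];
      rw [pv_rotate_branch (fun s => (s.2, -s.1)) (by intro p; simp) cycle] ] <;>
    rcases hk with hkk | hkk | hkk | hkk <;>
    simp [hkk, Function.iterate_succ_apply]

-- ===== VERDICT (by name: the statement is the Claim_ definition above) =====
theorem rotate_direction_spec : Claim_equal_rotate_direction := by
  intro side value ns_offset ew_offset _
  exact rotate_direction_eq_alt side value ns_offset ew_offset
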